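-- pv_equiv track=rewrite | github.com/ankursinha11/Bucky | document_generator.py | _format_list_rows
-- ===== SOURCE A (Python) =====
-- def _format_list_rows(list1, list2) -> str:
--     """Format two lists for markdown table"""
--     max_len = max(len(list1) if list1 else 0, len(list2) if list2 else 0)
--     rows = []
--
--     for i in range(max_len):
--         val1 = list1[i] if list1 and i < len(list1) else ""
--         val2 = list2[i] if list2 and i < len(list2) else ""
--         rows.append(f"| {val1} | {val2} |")
--
--     return "\n".join(rows) if rows else "| - | - |"
-- ===== SOURCE B (Python) =====
-- def _format_list_rows(list1, list2) -> str:
--     """Format two lists for markdown table"""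
--     l1, l2 = list1 or [], list2 or []
--     k = min(len(l1), len(l2))
--     rows = [f"| {a} | {b} |" for a, b in zip(l1, l2)]
--     rows += [f"| {a} |  |" for a in l1[k:]]
--     rows += [f"|  | {b} |" for b in l2[k:]]
--     return "\n".join(rows) if rows else "| - | - |"
-- ===== Notes on version B (the rewrite author's own statement) =====
-- stated objective: alternative
-- what changed: Instead of A's single padded index loop to the max length with per-iteration bounds checks, B builds the rows in three staged passes: zip over the common prefix, then the leftover tail of list1 slice-mapped to rows with an empty right cell, then the leftover tail of list2 to rows with an empty left cell.
import Mathlib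
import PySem

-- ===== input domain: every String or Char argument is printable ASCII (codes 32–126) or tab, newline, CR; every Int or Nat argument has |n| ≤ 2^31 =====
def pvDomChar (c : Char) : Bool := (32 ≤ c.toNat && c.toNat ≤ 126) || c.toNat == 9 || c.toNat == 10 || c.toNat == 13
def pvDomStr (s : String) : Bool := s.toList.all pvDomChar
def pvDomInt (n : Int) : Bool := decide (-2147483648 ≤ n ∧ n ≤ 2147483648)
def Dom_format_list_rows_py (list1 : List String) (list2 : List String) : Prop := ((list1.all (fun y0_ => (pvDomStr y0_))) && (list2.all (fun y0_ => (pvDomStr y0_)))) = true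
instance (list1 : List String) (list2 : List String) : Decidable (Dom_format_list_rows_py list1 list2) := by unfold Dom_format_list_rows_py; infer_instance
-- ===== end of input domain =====

-- B replaces A's single padded index loop with three staged passes (zip over the common
-- prefix, then each leftover tail mapped to half-empty rows); objective: alternative,
-- same return value on all inputs.

-- ===== PORT A =====
def format_list_rows_py (list1 : List String) (list2 : List String) : String :=
  let maxLen : Int :=
    max (if list1 ≠ [] then PySem.List.len list1 else 0)
        (if list2 ≠ [] then PySem.List.len list2 else 0)
  let rows : List String :=
    (PySem.List.pyRange 0 maxLen 1).foldl (fun acc i =>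
      let val1 := if list1 ≠ [] ∧ i < PySem.List.len list1 then PySem.List.pyGetD list1 i "" else ""
      let val2 := if list2 ≠ [] ∧ i < PySem.List.len list2 then PySem.List.pyGetD list2 i "" else ""
      acc ++ ["| " ++ val1 ++ " | " ++ val2 ++ " |"]) []
  if rows ≠ [] then PySem.Str.join "\n" rows else "| - | - |"

-- ===== PORT B =====
def format_list_rows_py_alt (list1 : List String) (list2 : List String) : String :=
  -- 'list1 or []' / 'list2 or []' are the identity on lists
  let k : Nat := min list1.length list2.length
  let rows : List String :=
    (list1.zip list2).map (fun p => "| " ++ p.1 ++ " | " ++ p.2 ++ " |")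
      ++ (PySem.List.slice list1 (some (k : Int)) none).map (fun a => "| " ++ a ++ " |  |")
      ++ (PySem.List.slice list2 (some (k : Int)) none).map (fun b => "|  | " ++ b ++ " |")
  if rows ≠ [] then PySem.Str.join "\n" rows else "| - | - |"

-- ===== PRECONDITION & SPEC =====
def Spec_format_list_rows_py (list1 : List String) (list2 : List String) (out : String) : Prop := out = format_list_rows_py_alt list1 list2
instance (list1 : List String) (list2 : List String) (out : String) : Decidable (Spec_format_list_rows_py list1 list2 out) := by unfold Spec_format_list_rows_py; infer_instance

-- ===== CLAIM (what is proved, stated in full; the proofs are below) =====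
def Claim_equal_format_list_rows_py : Prop := ∀ (list1 : List String) (list2 : List String), Dom_format_list_rows_py list1 list2 → Spec_format_list_rows_py list1 list2 (format_list_rows_py list1 list2)

-- ===== LEMMAS AND PROOFS =====

-- proof-side helpers: the common row shape and the merged row list both programs build
def pvRow (a b : String) : String := "| " ++ a ++ " | " ++ b ++ " |"

def pvZipLongestRows : List String → List String → List String
  | [], [] => []
  | a :: as, [] => pvRow a "" :: pvZipLongestRows as []
  | [], b :: bs => pvRow "" b :: pvZipLongestRows [] bs
  | a :: as, b :: bs => pvRow a b :: pvZipLongestRows as bs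

theorem pvRow_right_empty (a : String) : pvRow a "" = "| " ++ a ++ " |  |" := by
  simp only [pvRow, String.append_empty, String.append_assoc]
  rfl

theorem pvRow_left_empty (b : String) : pvRow "" b = "|  | " ++ b ++ " |" := by
  simp [pvRow]

theorem pvZipLongestRows_nil_left (l : List String) :
    pvZipLongestRows [] l = l.map (fun b => "|  | " ++ b ++ " |") := by
  induction l with
  | nil => simp [pvZipLongestRows]
  | cons b bs ih => simp [pvZipLongestRows, ih, pvRow_left_empty]

theorem pvZipLongestRows_nil_right (l : List String) :
    pvZipLongestRows l [] = l.map (fun a => "| " ++ a ++ " |  |") := by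
  induction l with
  | nil => simp [pvZipLongestRows]
  | cons a as ih => simp [pvZipLongestRows, ih, pvRow_right_empty]

-- B's staged row lists merge into the zip-longest row list
theorem alt_rows_eq (l1 l2 : List String) :
    (l1.zip l2).map (fun p => "| " ++ p.1 ++ " | " ++ p.2 ++ " |")
      ++ (l1.drop (min l1.length l2.length)).map (fun a => "| " ++ a ++ " |  |")
      ++ (l2.drop (min l1.length l2.length)).map (fun b => "|  | " ++ b ++ " |")
      = pvZipLongestRows l1 l2 := by
  induction l1 generalizing l2 with
  | nil => simp [pvZipLongestRows_nil_left]
  | cons a as ih =>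
    cases l2 with
    | nil => simp [pvZipLongestRows_nil_right]
    | cons b bs =>
      simp only [List.zip_cons_cons, List.map_cons, List.length_cons,
        Nat.succ_min_succ, List.drop_succ_cons, List.cons_append,
        pvZipLongestRows]
      exact congrArg _ (ih bs)

-- A's indexed row list characterised as the same zip-longest row list
theorem pvZipLongestRows_eq_map_range (l1 l2 : List String) :
    pvZipLongestRows l1 l2 =
      (List.range (max l1.length l2.length)).map
        (fun k => pvRow (l1.getD k "") (l2.getD k "")) := by
  induction l1 generalizing l2 with
  | nil =>
    induction l2 with
    | nil => simp [pvZipLongestRows]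
    | cons b bs ih =>
      simp only [pvZipLongestRows, List.length_nil, List.length_cons,
        Nat.max_eq_right (Nat.zero_le _)] at *
      rw [List.range_succ_eq_map]
      simp [ih, List.map_map, Function.comp_def]
  | cons a as ih =>
    cases l2 with
    | nil =>
      simp only [pvZipLongestRows, List.length_cons, List.length_nil,
        Nat.max_eq_left (Nat.zero_le _)] at *
      rw [List.range_succ_eq_map]
      simpa [List.map_map, Function.comp_def] using ih []
    | cons b bs =>
      simp only [pvZipLongestRows, List.length_cons, Nat.succ_max_succ]
      rw [List.range_succ_eq_map]
      simp [ih bs, List.map_map, Function.comp_def]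

theorem format_list_rows_eq (l1 l2 : List String) :
    format_list_rows_py l1 l2 = format_list_rows_py_alt l1 l2 := by
  simp only [format_list_rows_py, format_list_rows_py_alt,
    PySem.List.slice_from_natCast]
  have hmax : (max (if l1 ≠ [] then PySem.List.len l1 else 0)
      (if l2 ≠ [] then PySem.List.len l2 else 0)) = ((max l1.length l2.length : Nat) : Int) := by
    rcases l1 with _ | ⟨a, as⟩ <;> rcases l2 with _ | ⟨b, bs⟩ <;>
      simp [PySem.List.len] <;> omega
  have hgd : ∀ (l : List String) (k : Nat),
      (if l ≠ [] ∧ ((k : Int)) < PySem.List.len l then PySem.List.pyGetD l ((k : Int)) "" else "")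
        = l.getD k "" := by
    intro l k
    by_cases h : k < l.length
    · have hne : l ≠ [] := by rintro rfl; simp at h
      simp [hne, PySem.List.len, h, PySem.List.pyGetD_natCast]
    · simp [h, List.getD_eq_getElem?_getD]
  have hrows : (PySem.List.pyRange 0 ((max l1.length l2.length : Nat) : Int) 1).foldl
      (fun (acc : List String) (i : Int) =>
        acc ++ ["| " ++ (if l1 ≠ [] ∧ i < PySem.List.len l1 then PySem.List.pyGetD l1 i "" else "")
          ++ " | " ++ (if l2 ≠ [] ∧ i < PySem.List.len l2 then PySem.List.pyGetD l2 i "" else "")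
          ++ " |"]) []
      = pvZipLongestRows l1 l2 := by
    rw [PySem.List.foldl_append_singleton_eq_map, PySem.List.pyRange_zero_natCast,
      List.map_map, List.nil_append, pvZipLongestRows_eq_map_range]
    refine List.map_congr_left ?_
    intro k _
    simp only [Function.comp_def]
    rw [hgd l1 k, hgd l2 k]
    rfl
  rw [hmax, hrows, alt_rows_eq]

-- ===== VERDICT (by name: the statement is the Claim_ definition above) =====
theorem format_list_rows_py_spec : Claim_equal_format_list_rows_py := by
  intro l1 l2 _
  unfold Spec_format_list_rows_py
  exact format_list_rows_eq l1 l2
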